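-- pv_equiv track=rewrite | github.com/dkoh12/gamma | Python/search.py | reading
-- ===== SOURCE A (Python) =====
-- def reading(lst):
-- 	values = []
-- 	stack = []
-- 	val_arr = []
--
-- 	for i in lst:
-- 		if len(stack) == 0:
-- 			stack.append(i)
-- 			val_arr.append(1)
-- 			values.append(1)
-- 			continue
--
-- 		count = 1
-- 		while len(stack) != 0 and i >= stack[-1]:
-- 			stack.pop()
-- 			v = val_arr.pop()
-- 			count += v
--
-- 		stack.append(i)
-- 		val_arr.append(count)
-- 		values.append(count)
--
-- 		if i < stack[-1]:
-- 			stack.append(i)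
-- 			val_arr.append(1)
-- 			values.append(1)
--
--
-- 	return values
-- ===== SOURCE B (Python) =====
-- def reading(lst):
--     # span-style nested scan: for each index k, walk j back while lst[j] <= lst[k];
--     # the answer is the distance walked (k - j), i.e. 1 + length of that run
--     values = []
--     for k, x in enumerate(lst):
--         j = k - 1
--         while j >= 0 and lst[j] <= x:
--             j -= 1
--         values.append(k - j)
--     return values
-- ===== Notes on version B (the rewrite author's own statement) =====
-- stated objective: simpler
-- what changed: Replaces the stack/val_arr bookkeeping (with its dead re-push branch) by a plain nested backward scan: for each element count how far back the prefix stays <= it.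
import Mathlib
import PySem

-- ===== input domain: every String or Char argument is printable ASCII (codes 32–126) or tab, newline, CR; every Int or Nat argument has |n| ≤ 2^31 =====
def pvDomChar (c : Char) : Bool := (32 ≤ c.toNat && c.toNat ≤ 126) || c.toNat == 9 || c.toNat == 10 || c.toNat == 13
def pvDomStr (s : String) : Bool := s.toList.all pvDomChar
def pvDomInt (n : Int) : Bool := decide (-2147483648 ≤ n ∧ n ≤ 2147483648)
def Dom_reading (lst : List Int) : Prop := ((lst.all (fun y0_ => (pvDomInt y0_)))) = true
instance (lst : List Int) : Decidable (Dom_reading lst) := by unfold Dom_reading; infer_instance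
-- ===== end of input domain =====

-- B replaces A's stack/val_arr bookkeeping by a plain nested backward scan (simpler, same values).


-- ===== PORT A =====
-- the while loop popping stack/val_arr while i >= stack[-1], accumulating count
def popLoop (y : Int) : Int → List Int → List Int → Int × List Int × List Int
  | c, t :: s, w :: v => if t ≤ y then popLoop y (c + w) s v else (c, t :: s, w :: v)
  | c, s, v => (c, s, v)

-- the for loop over lst; stack/valArr kept top-at-head (Python's stack[-1] = head)
def readingLoop : List Int → List Int → List Int → List Int → List Int
  | [], values, _stack, _valArr => values
  | i :: rest, values, stack, valArr =>
    if stack = [] then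
      readingLoop rest (values ++ [1]) [i] [1]
    else
      let r := popLoop i 1 stack valArr
      let stack' := i :: r.2.1
      let valArr' := r.1 :: r.2.2
      let values' := values ++ [r.1]
      -- Python's trailing `if i < stack[-1]` (stack[-1] = i just pushed, so never taken)
      if i < stack'.headD 0 then
        readingLoop rest (values' ++ [1]) (i :: stack') (1 :: valArr')
      else
        readingLoop rest values' stack' valArr'

def reading (lst : List Int) : List Int := readingLoop lst [] [] []

-- ===== PORT B =====
-- the inner backward index walk (j from k-1 down while lst[j] <= lst[k]): rev is the
-- reversed processed prefix, so successive heads of rev are exactly lst[k-1], lst[k-2], …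
-- and the returned distance k - j equals 1 + the number of steps taken (exact)
def cntB (x : Int) : List Int → Int
  | [] => 0
  | y :: ys => if y ≤ x then 1 + cntB x ys else 0

def goB : List Int → List Int → List Int
  | _, [] => []
  | rev, x :: xs => (1 + cntB x rev) :: goB (x :: rev) xs

def reading_alt (lst : List Int) : List Int := goB [] lst

-- ===== PRECONDITION & SPEC =====
def Spec_reading (lst : List Int) (out : List Int) : Prop := out = reading_alt lst
instance (lst : List Int) (out : List Int) : Decidable (Spec_reading lst out) := by unfold Spec_reading; infer_instance

-- ===== CLAIM (what is proved, stated in full; the proofs are below) =====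
def Claim_equal_reading : Prop := ∀ (lst : List Int), Dom_reading lst → Spec_reading lst (reading lst)

-- ===== LEMMAS AND PROOFS =====

-- Invariant: the reversed processed prefix decomposes into blocks, one per stack entry:
-- each block is its stack value followed by (count - 1) elements all ≤ that value.
inductive Blocks : List Int → List Int → List Int → Prop
  | nil : Blocks [] [] []
  | cons (t : Int) (tail r s v : List Int) (h : ∀ x ∈ tail, x ≤ t)
      (hb : Blocks r s v) :
      Blocks (t :: (tail ++ r)) (t :: s) (((tail.length : Int) + 1) :: v)

lemma blocks_nil_stack {r v : List Int} (h : Blocks r [] v) : r = [] ∧ v = [] := by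
  cases h; exact ⟨rfl, rfl⟩

lemma cntB_append_le (x : Int) (tl r : List Int) (h : ∀ z ∈ tl, z ≤ x) :
    cntB x (tl ++ r) = tl.length + cntB x r := by
  induction tl with
  | nil => simp
  | cons a as ih =>
    have ha : a ≤ x := h a (by simp)
    simp only [List.cons_append, cntB, if_pos ha,
      ih (fun z hz => h z (by simp [hz])), List.length_cons]
    push_cast; ring

lemma pop_key (y : Int) : ∀ {r s v : List Int}, Blocks r s v → ∀ c : Int,
    ∃ tail r' s' v', r = tail ++ r' ∧ (∀ z ∈ tail, z ≤ y) ∧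
      popLoop y c s v = (c + (tail.length : Int), s', v') ∧ Blocks r' s' v' ∧
      cntB y r = (tail.length : Int) := by
  intro r s v hb
  induction hb with
  | nil =>
    intro c
    exact ⟨[], [], [], [], by simp, by simp, by simp [popLoop], Blocks.nil, by simp [cntB]⟩
  | cons t tl r s v h hb ih =>
    intro c
    by_cases hty : t ≤ y
    · obtain ⟨tail2, r', s', v', hr, hle, hpop, hb', hcnt⟩ := ih (c + ((tl.length : Int) + 1))
      refine ⟨t :: (tl ++ tail2), r', s', v', by simp [hr], ?_, ?_, hb', ?_⟩
      · intro z hz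
        rcases List.mem_cons.1 hz with hz | hz
        · simpa [hz] using hty
        · rcases List.mem_append.1 hz with hz | hz
          · exact le_trans (h z hz) hty
          · exact hle z hz
      · simp only [popLoop, if_pos hty, hpop, List.length_cons, List.length_append]
        have : c + ((tl.length : Int) + 1) + (tail2.length : Int)
            = c + ((tl.length + tail2.length + 1 : Nat) : Int) := by push_cast; ring
        rw [this]
      · rw [hr] at *
        have htl : ∀ z ∈ tl, z ≤ y := fun z hz => le_trans (h z hz) hty
        have : cntB y (t :: (tl ++ (tail2 ++ r'))) =
            1 + ((tl.length : Int) + cntB y (tail2 ++ r')) := by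
          simp [cntB, if_pos hty, cntB_append_le y tl _ htl]
        rw [this, hcnt]
        simp only [List.length_cons, List.length_append]
        push_cast; ring
    · refine ⟨[], t :: (tl ++ r), t :: s, ((tl.length : Int) + 1) :: v,
        by simp, by simp, ?_, Blocks.cons t tl r s v h hb, ?_⟩
      · simp [popLoop, if_neg hty]
      · simp [cntB, if_neg hty]

lemma readingLoop_eq_goB : ∀ (rest r s v values : List Int), Blocks r s v →
    readingLoop rest values s v = values ++ goB r rest := by
  intro rest
  induction rest with
  | nil => intro r s v values _; simp [readingLoop, goB]
  | cons x xs ih =>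
    intro r s v values hb
    cases s with
    | nil =>
      obtain ⟨hr, hv⟩ := blocks_nil_stack hb
      subst hr; subst hv
      have hb1 : Blocks [x] [x] [1] := by
        have := Blocks.cons x [] [] [] [] (by simp) Blocks.nil
        simpa using this
      rw [show readingLoop (x :: xs) values [] [] =
          readingLoop xs (values ++ [1]) [x] [1] from rfl,
        ih [x] [x] [1] (values ++ [1]) hb1]
      simp [goB, cntB]
    | cons t s0 =>
      obtain ⟨tail, r', s', v', hr, hle, hpop, hb', hcnt⟩ := pop_key x hb 1
      have hstep : readingLoop (x :: xs) values (t :: s0) v =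
          readingLoop xs (values ++ [1 + (tail.length : Int)])
            (x :: s') ((1 + (tail.length : Int)) :: v') := by
        simp [readingLoop, hpop]
      have hbnew : Blocks (x :: r) (x :: s') ((1 + (tail.length : Int)) :: v') := by
        rw [hr, show (1 + (tail.length : Int)) = (tail.length : Int) + 1 by ring]
        exact Blocks.cons x tail r' s' v' hle hb'
      rw [hstep, ih (x :: r) (x :: s') ((1 + (tail.length : Int)) :: v')
          (values ++ [1 + (tail.length : Int)]) hbnew]
      simp [goB, hcnt]

-- ===== VERDICT (by name: the statement is the Claim_ definition above) =====
theorem reading_spec : Claim_equal_reading := by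
  intro lst _
  unfold Spec_reading reading reading_alt
  simpa using readingLoop_eq_goB lst [] [] [] [] Blocks.nil
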